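-- pv_equiv track=rewrite | github.com/AngieGarro/Tecnico_Python | PruebaTecnica3/PruebaThree.py | palabras_con_repetidas_consecutivas
-- ===== SOURCE A (Python) =====
-- def palabras_con_repetidas_consecutivas(cadena):
--     palabras = cadena.split()
--     palabras_con_repetidas = []
--     for palabra in palabras:
--         for i in range(len(palabra) - 2):
--             if palabra[i] == palabra[i + 1] == palabra[i + 2]:
--                 palabras_con_repetidas.append(palabra)
--                 break
--     return palabras_con_repetidas
-- ===== SOURCE B (Python) =====
-- def _tiene_triple(palabra):
--     # one pass: length of the current run of equal characters
--     run = 0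
--     prev = None
--     for ch in palabra:
--         run = run + 1 if ch == prev else 1
--         if run >= 3:
--             return True
--         prev = ch
--     return False
--
--
-- def palabras_con_repetidas_consecutivas(cadena):
--     return [palabra for palabra in cadena.split() if _tiene_triple(palabra)]
-- ===== Notes on version B (the rewrite author's own statement) =====
-- stated objective: alternative
-- what changed: Replaces the index-window scan (palabra[i]==palabra[i+1]==palabra[i+2] over range(len-2)) with accumulator-and-break by a list comprehension filtering on a one-pass run-length counter over the word's characters.
import Mathlib
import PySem

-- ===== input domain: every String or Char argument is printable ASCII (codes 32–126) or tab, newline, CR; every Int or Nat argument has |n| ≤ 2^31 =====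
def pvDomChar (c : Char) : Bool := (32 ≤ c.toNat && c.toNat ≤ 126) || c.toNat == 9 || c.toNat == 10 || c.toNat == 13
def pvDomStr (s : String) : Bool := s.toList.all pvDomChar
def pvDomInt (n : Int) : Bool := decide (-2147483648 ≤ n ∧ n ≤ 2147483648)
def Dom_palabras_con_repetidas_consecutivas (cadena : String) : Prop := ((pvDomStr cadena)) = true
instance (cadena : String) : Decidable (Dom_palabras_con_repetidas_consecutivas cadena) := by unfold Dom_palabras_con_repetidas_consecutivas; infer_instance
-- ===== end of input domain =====

-- B replaces A's index-window triple comparison with a one-pass run-length counter; alternative decomposition, same cost.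

-- ===== PORT A =====
-- inner 'for i in range(len(palabra) - 2): if palabra[i]==palabra[i+1]==palabra[i+2]: …; break'
def pvAInner (w : List Char) (n : Nat) (i : Nat) : Bool :=
  if i < n then
    if PySem.List.pyGet? w (i : Int) == PySem.List.pyGet? w ((i : Int) + 1)
        && PySem.List.pyGet? w ((i : Int) + 1) == PySem.List.pyGet? w ((i : Int) + 2)
    then true
    else pvAInner w n (i + 1)
  else false
termination_by n - i

def palabras_con_repetidas_consecutivas (cadena : String) : List String :=
  let palabras := PySem.Str.split₀ cadena
  palabras.foldl
    (fun acc palabra =>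
      if pvAInner palabra.toList (palabra.toList.length - 2) 0 then acc ++ [palabra] else acc)
    []

-- ===== PORT B =====
-- '_tiene_triple': run-length counter over the characters, early return at run ≥ 3
def pvTieneTriple (cs : List Char) (run : Int) (prev : Option Char) : Bool :=
  match cs with
  | [] => false
  | c :: rest =>
      let run' := if some c == prev then run + 1 else 1
      if 3 ≤ run' then true else pvTieneTriple rest run' (some c)

def palabras_con_repetidas_consecutivas_alt (cadena : String) : List String :=
  (PySem.Str.split₀ cadena).filter (fun palabra => pvTieneTriple palabra.toList 0 none)

-- ===== PRECONDITION & SPEC =====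
def Spec_palabras_con_repetidas_consecutivas (cadena : String) (out : List String) : Prop := out = palabras_con_repetidas_consecutivas_alt cadena
instance (cadena : String) (out : List String) : Decidable (Spec_palabras_con_repetidas_consecutivas cadena out) := by unfold Spec_palabras_con_repetidas_consecutivas; infer_instance

-- ===== CLAIM (what is proved, stated in full; the proofs are below) =====
def Claim_equal_palabras_con_repetidas_consecutivas : Prop := ∀ (cadena : String), Dom_palabras_con_repetidas_consecutivas cadena → Spec_palabras_con_repetidas_consecutivas cadena (palabras_con_repetidas_consecutivas cadena)

-- ===== LEMMAS AND PROOFS =====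

-- reference predicate: the word has three equal consecutive characters
def pvHasT : List Char → Bool
  | a :: b :: c :: r => (a == b && b == c) || pvHasT (b :: c :: r)
  | _ => false

lemma pvHasT_short (l : List Char) (h : l.length < 3) : pvHasT l = false := by
  match l with
  | [] => rfl
  | [_] => rfl
  | [_, _] => rfl
  | _ :: _ :: _ :: _ => simp at h; omega

lemma pvTieneTriple_run (cs : List Char) : ∀ p : Char,
    (pvTieneTriple cs 1 (some p) = pvHasT (p :: cs)) ∧
    (pvTieneTriple cs 2 (some p) = pvHasT (p :: p :: cs)) := by
  induction cs with
  | nil =>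
      intro p
      constructor <;> simp [pvTieneTriple, pvHasT]
  | cons c rest ih =>
      intro p
      constructor
      · by_cases hc : c = p
        · subst hc
          simp only [pvTieneTriple]
          norm_num
          rcases ih c with ⟨_, h2⟩
          rw [h2]
        · have hb : (some c == some p) = false := by simp [hc]
          simp only [pvTieneTriple, hb]
          norm_num
          rcases ih c with ⟨h1, _⟩
          rw [h1]
          have : (p == c) = false := by simp [Ne.symm hc]
          cases rest with
          | nil => simp [pvHasT]
          | cons d r => simp [pvHasT, this]
      · by_cases hc : c = p
        · subst hc
          simp [pvTieneTriple, pvHasT]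
        · have hb : (some c == some p) = false := by simp [hc]
          simp only [pvTieneTriple, pvHasT, hb]
          norm_num
          rcases ih c with ⟨h1, _⟩
          rw [h1]
          have hpc : (p == c) = false := by simp [Ne.symm hc]
          cases rest with
          | nil => simp [pvHasT, hpc]
          | cons d r => simp [pvHasT, hpc]

lemma pvTieneTriple_start (cs : List Char) : pvTieneTriple cs 0 none = pvHasT cs := by
  cases cs with
  | nil => rfl
  | cons c rest =>
      simp only [pvTieneTriple]
      norm_num
      exact (pvTieneTriple_run rest c).1

lemma pvAInner_eq (cs : List Char) : ∀ k i, cs.length - i ≤ k →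
    pvAInner cs (cs.length - 2) i = pvHasT (cs.drop i) := by
  intro k
  induction k with
  | zero =>
      intro i hi
      rw [pvAInner]
      have hni : ¬ i < cs.length - 2 := by omega
      simp only [hni, if_false]
      rw [pvHasT_short _ (by simp; omega)]
  | succ k ih =>
      intro i hi
      rw [pvAInner]
      by_cases h : i < cs.length - 2
      · simp only [h, if_true]
        have h0 : i < cs.length := by omega
        have h1 : i + 1 < cs.length := by omega
        have h2 : i + 2 < cs.length := by omega
        have g0 : PySem.List.pyGet? cs (i : Int) = some cs[i] := by
          simp [PySem.List.pyGet?_natCast, List.getElem?_eq_getElem h0]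
        have g1 : PySem.List.pyGet? cs ((i : Int) + 1) = some cs[i + 1] := by
          have hcast : ((i : Int) + 1) = ((i + 1 : Nat) : Int) := by push_cast; ring
          rw [hcast, PySem.List.pyGet?_natCast]
          exact List.getElem?_eq_getElem h1
        have g2 : PySem.List.pyGet? cs ((i : Int) + 2) = some cs[i + 2] := by
          have hcast : ((i : Int) + 2) = ((i + 2 : Nat) : Int) := by push_cast; ring
          rw [hcast, PySem.List.pyGet?_natCast]
          exact List.getElem?_eq_getElem h2
        have d0 : cs.drop i = cs[i] :: cs.drop (i + 1) := List.drop_eq_getElem_cons h0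
        have d1 : cs.drop (i + 1) = cs[i + 1] :: cs.drop (i + 2) := List.drop_eq_getElem_cons h1
        have d2 : cs.drop (i + 2) = cs[i + 2] :: cs.drop (i + 3) := List.drop_eq_getElem_cons h2
        rw [g0, g1, g2, d0, d1, d2]
        simp only [pvHasT]
        rw [← d2, ← d1]
        by_cases hcond : (cs[i] == cs[i + 1] && cs[i + 1] == cs[i + 2]) = true
        · simp [hcond]
        · rw [ih (i + 1) (by omega)]
          simp only [Bool.and_eq_true, beq_iff_eq] at hcond ⊢
          by_cases e1 : cs[i] = cs[i + 1] <;> by_cases e2 : cs[i + 1] = cs[i + 2] <;>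
            first | (simp [e1, e2] at hcond ⊢; tauto) | simp [e1, e2] at hcond ⊢
      · simp only [h, if_false]
        rw [pvHasT_short _ (by simp; omega)]

-- ===== VERDICT (by name: the statement is the Claim_ definition above) =====
theorem palabras_con_repetidas_consecutivas_spec : Claim_equal_palabras_con_repetidas_consecutivas := by
  intro cadena _
  unfold Spec_palabras_con_repetidas_consecutivas
  unfold palabras_con_repetidas_consecutivas palabras_con_repetidas_consecutivas_alt
  rw [PySem.List.foldl_append_if_eq_filter]
  simp only [List.nil_append]
  congr 1
  funext palabra
  rw [pvAInner_eq palabra.toList palabra.toList.length 0 (by omega), List.drop_zero,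
    pvTieneTriple_start]
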